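-- pv_equiv track=rewrite | github.com/gurnoor6/Text-To-Latex | backend/texttolatex/src/data/line_seperation.py | get_hpp_clusters
-- ===== SOURCE A (Python) =====
-- def get_hpp_clusters(peaks_index, min_cluster_size):
--     hpp_clusters = []
--     cluster = []
--     for index, value in enumerate(peaks_index):
--         cluster.append(value)
--
--         if index < len(peaks_index)-1 and peaks_index[index+1] - value > 1:
--             hpp_clusters.append(cluster)
--             cluster = []
--
--         #get the last cluster
--         if index == len(peaks_index)-1:
--             hpp_clusters.append(cluster)
--             cluster = []
--
--     hpp_clusters = [cluster for cluster in hpp_clusters if len(cluster)>=min_cluster_size]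
--
--     return hpp_clusters
-- ===== SOURCE B (Python) =====
-- def get_hpp_clusters(peaks_index, min_cluster_size):
--     # Staged passes: (1) find breakpoint positions, (2) turn them into segment
--     # boundaries, (3) slice the list into clusters, (4) filter by size.
--     if not peaks_index:
--         return []
--     n = len(peaks_index)
--     breaks = [i + 1 for i in range(n - 1) if peaks_index[i + 1] - peaks_index[i] > 1]
--     bounds = [0] + breaks + [n]
--     clusters = [peaks_index[a:b] for a, b in zip(bounds, bounds[1:])]
--     return [c for c in clusters if len(c) >= min_cluster_size]
-- ===== Notes on version B (the rewrite author's own statement) =====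
-- stated objective: alternative
-- what changed: Replaces A's single accumulator loop (append to a running cluster, flush on gap or at the last index) by staged passes: compute the list of breakpoint positions where the gap exceeds 1, turn them into segment boundaries [0]+breaks+[n], slice the input into clusters between consecutive boundaries, then filter by size.
import Mathlib
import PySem

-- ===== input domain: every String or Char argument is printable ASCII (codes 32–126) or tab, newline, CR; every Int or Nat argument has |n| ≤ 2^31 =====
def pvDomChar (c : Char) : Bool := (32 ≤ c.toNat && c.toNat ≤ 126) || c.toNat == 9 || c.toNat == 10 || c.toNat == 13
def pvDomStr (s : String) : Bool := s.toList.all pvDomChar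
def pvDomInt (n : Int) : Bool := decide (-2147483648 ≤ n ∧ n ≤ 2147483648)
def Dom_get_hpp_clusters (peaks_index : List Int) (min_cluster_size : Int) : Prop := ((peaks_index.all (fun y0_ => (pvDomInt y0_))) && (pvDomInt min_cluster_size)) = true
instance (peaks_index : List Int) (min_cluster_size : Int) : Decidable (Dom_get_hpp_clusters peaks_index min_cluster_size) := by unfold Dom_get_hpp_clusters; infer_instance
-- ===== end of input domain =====

-- B replaces A's single accumulator loop by staged passes: breakpoints → segment
-- boundaries [0]+breaks+[n] → slices between consecutive boundaries → size filter;
-- objective: alternative (same O(n) cost, a different decomposition).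

-- ===== PORT A =====
-- loop body of A: state = (hpp_clusters, cluster); iv = (index, value) from enumerate
def stepA (peaks_index : List Int) (st : List (List Int) × List Int) (iv : Int × Int) : List (List Int) × List Int :=
  let cluster := st.2 ++ [iv.2]
  let st1 : List (List Int) × List Int :=
    -- peaks_index[index+1]: in range whenever the first conjunct holds, so pyGetD's default is never read
    if iv.1 < (peaks_index.length : Int) - 1 ∧ 1 < PySem.List.pyGetD peaks_index (iv.1 + 1) 0 - iv.2 then
      (st.1 ++ [cluster], [])
    else (st.1, cluster)
  if iv.1 = (peaks_index.length : Int) - 1 then (st1.1 ++ [st1.2], []) else st1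

def get_hpp_clusters (peaks_index : List Int) (min_cluster_size : Int) : List (List Int) :=
  let st := (PySem.List.enumerate peaks_index 0).foldl (stepA peaks_index) ([], [])
  st.1.filter (fun cluster => decide (min_cluster_size ≤ (cluster.length : Int)))

-- ===== PORT B =====
def get_hpp_clusters_alt (peaks_index : List Int) (min_cluster_size : Int) : List (List Int) :=
  if peaks_index = [] then []
  else
    let n : Int := (peaks_index.length : Int)
    -- [i + 1 for i in range(n - 1) if peaks_index[i + 1] - peaks_index[i] > 1]
    let breaks := ((PySem.List.pyRange 0 (n - 1) 1).filter
      (fun i => decide (1 < PySem.List.pyGetD peaks_index (i + 1) 0 - PySem.List.pyGetD peaks_index i 0))).map (· + 1)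
    let bounds := 0 :: (breaks ++ [n])
    -- [peaks_index[a:b] for a, b in zip(bounds, bounds[1:])]
    let clusters := (bounds.zip bounds.tail).map
      (fun ab => PySem.List.slice peaks_index (some ab.1) (some ab.2))
    clusters.filter (fun c => decide (min_cluster_size ≤ (c.length : Int)))

-- ===== PRECONDITION & SPEC =====
def Spec_get_hpp_clusters (peaks_index : List Int) (min_cluster_size : Int) (out : List (List Int)) : Prop := out = get_hpp_clusters_alt peaks_index min_cluster_size
instance (peaks_index : List Int) (min_cluster_size : Int) (out : List (List Int)) : Decidable (Spec_get_hpp_clusters peaks_index min_cluster_size out) := by unfold Spec_get_hpp_clusters; infer_instance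

-- ===== CLAIM (what is proved, stated in full; the proofs are below) =====
def Claim_equal_get_hpp_clusters : Prop := ∀ (peaks_index : List Int) (min_cluster_size : Int), Dom_get_hpp_clusters peaks_index min_cluster_size → Spec_get_hpp_clusters peaks_index min_cluster_size (get_hpp_clusters peaks_index min_cluster_size)

-- ===== LEMMAS AND PROOFS =====

-- canonical grouping: contiguous runs (gap ≤ 1), built by structural recursion
def splitRuns : List Int → List (List Int)
  | [] => []
  | x :: xs =>
    match splitRuns xs with
    | (y :: c) :: r => if y - x ≤ 1 then (x :: y :: c) :: r else [x] :: (y :: c) :: r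
    | r => [x] :: r

lemma splitRuns_cons (x : Int) (xs : List Int) :
    splitRuns (x :: xs) =
      (match splitRuns xs with
       | (y :: c) :: r => if y - x ≤ 1 then (x :: y :: c) :: r else [x] :: (y :: c) :: r
       | r => [x] :: r) := by
  rw [splitRuns]

lemma splitRuns_head (x : Int) (xs : List Int) :
    ∃ c r, splitRuns (x :: xs) = (x :: c) :: r := by
  rw [splitRuns_cons]
  rcases h : splitRuns xs with _ | ⟨_ | ⟨y, c⟩, r⟩
  · exact ⟨[], [], rfl⟩
  · exact ⟨[], [] :: r, rfl⟩
  · by_cases hy : y - x ≤ 1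
    · exact ⟨y :: c, r, if_pos hy⟩
    · exact ⟨[], (y :: c) :: r, if_neg hy⟩

-- what A's loop computes, written as a recursion with lookahead
def loopSpec (hpp : List (List Int)) (cl : List Int) : List Int → List (List Int)
  | [] => hpp
  | v :: rest =>
    if rest = [] then hpp ++ [cl ++ [v]]
    else if 1 < rest.headI - v then loopSpec (hpp ++ [cl ++ [v]]) [] rest
    else loopSpec hpp (cl ++ [v]) rest

lemma loopSpec_cons (hpp : List (List Int)) (cl : List Int) (v : Int) (rest : List Int) :
    loopSpec hpp cl (v :: rest) =
      if rest = [] then hpp ++ [cl ++ [v]]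
      else if 1 < rest.headI - v then loopSpec (hpp ++ [cl ++ [v]]) [] rest
      else loopSpec hpp (cl ++ [v]) rest := by
  rw [loopSpec]

-- A's enumerate-fold over the suffix ys (full list = pre ++ ys) is loopSpec
lemma A_fold_eq_loopSpec (ys : List Int) : ∀ (pre : List Int) (hpp : List (List Int)) (cl : List Int),
    (PySem.List.enumerate ys (pre.length : Int)).foldl (stepA (pre ++ ys)) (hpp, cl)
      = (loopSpec hpp cl ys, if ys = [] then cl else []) := by
  induction ys with
  | nil =>
    intro pre hpp cl
    simp [PySem.List.enumerate_nil, loopSpec]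
  | cons v rest ih =>
    intro pre hpp cl
    rw [PySem.List.enumerate_cons, List.foldl_cons]
    rcases rest with _ | ⟨w, t⟩
    · have h1 : ¬ ((pre.length : Int) < (((pre ++ [v]).length : Nat) : Int) - 1 ∧
          1 < PySem.List.pyGetD (pre ++ [v]) ((pre.length : Int) + 1) 0 - v) := by
        rintro ⟨h, -⟩
        simp only [List.length_append, List.length_cons, List.length_nil] at h
        push_cast at h; omega
      have h2 : (pre.length : Int) = (((pre ++ [v]).length : Nat) : Int) - 1 := by
        simp only [List.length_append, List.length_cons, List.length_nil]
        push_cast; ring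
      rw [PySem.List.enumerate_nil, List.foldl_nil]
      show stepA (pre ++ [v]) (hpp, cl) ((pre.length : Int), v) = _
      simp only [stepA]
      rw [if_neg h1, if_pos h2]
      simp [loopSpec]
    · have hget : PySem.List.pyGetD (pre ++ v :: w :: t) ((pre.length : Int) + 1) 0 = w := by
        have hc : ((pre.length : Int) + 1) = ((pre.length + 1 : Nat) : Int) := by push_cast; ring
        rw [hc, PySem.List.pyGetD_natCast]
        simp [List.getD]
      have hne : ¬ ((pre.length : Int) = (((pre ++ v :: w :: t).length : Nat) : Int) - 1) := by
        simp only [List.length_append, List.length_cons]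
        push_cast; omega
      have hlt : (pre.length : Int) < (((pre ++ v :: w :: t).length : Nat) : Int) - 1 := by
        simp only [List.length_append, List.length_cons]
        push_cast; omega
      have harr : pre ++ v :: w :: t = (pre ++ [v]) ++ (w :: t) := by simp
      have hidx : (pre.length : Int) + 1 = (((pre ++ [v]).length : Nat) : Int) := by
        simp only [List.length_append, List.length_cons, List.length_nil]
        push_cast; ring
      by_cases hgap : 1 < w - v
      · have hc1 : ((pre.length : Int) < (((pre ++ v :: w :: t).length : Nat) : Int) - 1 ∧
            1 < PySem.List.pyGetD (pre ++ v :: w :: t) ((pre.length : Int) + 1) 0 - v) :=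
          ⟨hlt, by rw [hget]; omega⟩
        have hst : stepA (pre ++ v :: w :: t) (hpp, cl) ((pre.length : Int), v)
            = (hpp ++ [cl ++ [v]], []) := by
          simp only [stepA]
          rw [if_pos hc1, if_neg hne]
        rw [hst, harr, hidx, ih (pre ++ [v]) (hpp ++ [cl ++ [v]]) []]
        rw [show loopSpec hpp cl (v :: w :: t) = loopSpec (hpp ++ [cl ++ [v]]) [] (w :: t) from by
          rw [loopSpec_cons, if_neg (List.cons_ne_nil w t),
            if_pos (show (1 : Int) < (w :: t).headI - v from by simpa using hgap)]]
        simp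
      · have hc1n : ¬ ((pre.length : Int) < (((pre ++ v :: w :: t).length : Nat) : Int) - 1 ∧
            1 < PySem.List.pyGetD (pre ++ v :: w :: t) ((pre.length : Int) + 1) 0 - v) := by
          rintro ⟨-, h⟩; rw [hget] at h; omega
        have hst : stepA (pre ++ v :: w :: t) (hpp, cl) ((pre.length : Int), v)
            = (hpp, cl ++ [v]) := by
          simp only [stepA]
          rw [if_neg hc1n, if_neg hne]
        rw [hst, harr, hidx, ih (pre ++ [v]) hpp (cl ++ [v])]
        rw [show loopSpec hpp cl (v :: w :: t) = loopSpec hpp (cl ++ [v]) (w :: t) from by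
          rw [loopSpec_cons, if_neg (List.cons_ne_nil w t),
            if_neg (show ¬ (1 : Int) < (w :: t).headI - v from by simpa using hgap)]]
        simp

def glue (cl : List Int) : List (List Int) → List (List Int)
  | [] => []
  | c :: r => (cl ++ c) :: r

lemma loopSpec_eq_glue (ys : List Int) : ys ≠ [] → ∀ (hpp : List (List Int)) (cl : List Int),
    loopSpec hpp cl ys = hpp ++ glue cl (splitRuns ys) := by
  induction ys with
  | nil => simp
  | cons v rest ih =>
    intro _ hpp cl
    rcases rest with _ | ⟨w, t⟩
    · rw [loopSpec_cons, if_pos rfl, splitRuns_cons]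
      simp [splitRuns, glue]
    · obtain ⟨c, r, hsp⟩ := splitRuns_head w t
      rw [loopSpec_cons, if_neg (List.cons_ne_nil w t)]
      by_cases hgap : 1 < w - v
      · have hsp' : splitRuns (v :: w :: t) = [v] :: (w :: c) :: r := by
          rw [splitRuns_cons, hsp]
          exact if_neg (by omega)
        rw [if_pos (by simpa using hgap), ih (List.cons_ne_nil w t) (hpp ++ [cl ++ [v]]) [],
          hsp, hsp']
        simp [glue]
      · have hsp' : splitRuns (v :: w :: t) = (v :: w :: c) :: r := by
          rw [splitRuns_cons, hsp]
          exact if_pos (by omega)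
        rw [if_neg (by simpa using hgap), ih (List.cons_ne_nil w t) hpp (cl ++ [v]), hsp, hsp']
        simp [glue]

-- A's pre-filter cluster list is splitRuns
lemma A_clusters (p : List Int) :
    ((PySem.List.enumerate p 0).foldl (stepA p) ([], [])).1 = splitRuns p := by
  have h := A_fold_eq_loopSpec p [] [] []
  simp only [List.length_nil, Nat.cast_zero, List.nil_append] at h
  rw [h]
  rcases p with _ | ⟨v, rest⟩
  · simp [loopSpec, splitRuns]
  · obtain ⟨c, r, hsp⟩ := splitRuns_head v rest
    show loopSpec [] [] (v :: rest) = _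
    rw [loopSpec_eq_glue _ (by simp) [] [], hsp]
    simp [glue]

-- ===== B-side lemmas =====

-- the breakpoint positions of B, as a structural recursion over Nat
def brkN : List Int → List Nat
  | [] => []
  | [_] => []
  | x :: y :: t => (if 1 < y - x then [1] else []) ++ (brkN (y :: t)).map (· + 1)

lemma brkN_cons₂ (x y : Int) (t : List Int) :
    brkN (x :: y :: t) = (if 1 < y - x then [1] else []) ++ (brkN (y :: t)).map (· + 1) := by
  rw [brkN]

lemma pyRange_shift (k : Nat) :
    PySem.List.pyRange 1 ((k : Int) + 1) 1 = (PySem.List.pyRange 0 (k : Int) 1).map (· + 1) := by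
  rw [PySem.List.pyRange_one, PySem.List.pyRange_one]
  have h1 : ((k : Int) + 1 - 1).toNat = k := by omega
  have h2 : ((k : Int) - 0).toNat = k := by omega
  rw [h1, h2, List.map_map]
  exact List.map_congr_left (fun a _ => by simp [Function.comp]; ring)

lemma pyGetD_cons_shift (x : Int) (q : List Int) (i : Int) (h : 0 ≤ i) (d : Int) :
    PySem.List.pyGetD (x :: q) (i + 1) d = PySem.List.pyGetD q i d := by
  obtain ⟨n, rfl⟩ := Int.eq_ofNat_of_zero_le h
  have : ((n : Int) + 1) = ((n + 1 : Nat) : Int) := by push_cast; ring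
  rw [this, PySem.List.pyGetD_natCast, PySem.List.pyGetD_natCast]
  rfl

lemma cast_map_add (M : List Nat) :
    (M.map (fun k : Nat => (k : Int))).map (· + 1) = (M.map (· + 1)).map (fun k : Nat => (k : Int)) := by
  induction M with
  | nil => rfl
  | cons a M ih =>
    simp only [List.map_cons]
    exact congrArg₂ List.cons (by omega) ih

-- B's breakpoint pass computes brkN (as Int casts)
lemma breaks_eq (p : List Int) :
    ((PySem.List.pyRange 0 ((p.length : Int) - 1) 1).filter
      (fun i => decide (1 < PySem.List.pyGetD p (i + 1) 0 - PySem.List.pyGetD p i 0))).map (· + 1)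
    = (brkN p).map (fun k : Nat => (k : Int)) := by
  induction p with
  | nil => simp [PySem.List.pyRange_one_eq_nil (by omega : (-1 : Int) ≤ 0), brkN]
  | cons x q ih =>
    rcases q with _ | ⟨y, t⟩
    · simp [PySem.List.pyRange_one_eq_nil (by omega : (0 : Int) ≤ 0), brkN]
    · have hlen : ((x :: y :: t).length : Int) - 1 = ((y :: t).length : Int) := by simp
      have hlen' : ((y :: t).length : Int) = ((t.length : Int)) + 1 := by simp
      rw [hlen, hlen',
        PySem.List.pyRange_one_cons (by positivity : (0 : Int) < (t.length : Int) + 1),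
        show (0 : Int) + 1 = 1 from by norm_num, pyRange_shift t.length, List.filter_cons]
      have hg0 : (decide (1 < PySem.List.pyGetD (x :: y :: t) (0 + 1) 0
          - PySem.List.pyGetD (x :: y :: t) 0 0)) = decide (1 < y - x) := by
        have h1 : PySem.List.pyGetD (x :: y :: t) (0 + 1) 0 = y := by
          rw [show (0 : Int) + 1 = ((1 : Nat) : Int) from by norm_num,
            PySem.List.pyGetD_natCast]
          rfl
        rw [h1, PySem.List.pyGetD_zero_cons]
      have hfm : (((PySem.List.pyRange 0 (t.length : Int) 1).map (· + 1)).filter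
            (fun i => decide (1 < PySem.List.pyGetD (x :: y :: t) (i + 1) 0
              - PySem.List.pyGetD (x :: y :: t) i 0)))
          = ((PySem.List.pyRange 0 (t.length : Int) 1).filter
            (fun i => decide (1 < PySem.List.pyGetD (y :: t) (i + 1) 0
              - PySem.List.pyGetD (y :: t) i 0))).map (· + 1) := by
        rw [List.filter_map]
        refine congrArg _ (List.filter_congr ?_)
        intro i hi
        have h0i : 0 ≤ i := ((PySem.List.mem_pyRange_one).1 hi).1
        simp only [Function.comp]
        rw [show i + 1 + 1 = (i + 1) + 1 from rfl,
          pyGetD_cons_shift x (y :: t) (i + 1) (by omega) 0,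
          pyGetD_cons_shift x (y :: t) i h0i 0]
      rw [hg0, hfm, brkN_cons₂]
      have hlen'' : ((y :: t).length : Int) - 1 = (t.length : Int) := by simp
      rw [← hlen'', ih]
      by_cases hgap : 1 < y - x
      · rw [if_pos (by simp [hgap] : decide (1 < y - x) = true), if_pos hgap,
          List.cons_append, List.nil_append, List.map_cons, List.map_cons]
        exact congrArg₂ List.cons (by norm_num) (cast_map_add (brkN (y :: t)))
      · rw [if_neg (by simp [hgap]), if_neg hgap, List.nil_append]
        exact cast_map_add (brkN (y :: t))

-- segments of p between consecutive Nat boundaries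
def segsN (p : List Int) (bds : List Nat) : List (List Int) :=
  (bds.zip bds.tail).map (fun ab => (p.drop ab.1).take (ab.2 - ab.1))

-- shifting every boundary by one strips the head element off the list being sliced
lemma zipShift (x : Int) (q : List Int) (B C : List Nat) :
    ((B.map (· + 1)).zip (C.map (· + 1))).map
        (fun ab => ((x :: q).drop ab.1).take (ab.2 - ab.1))
      = (B.zip C).map (fun ab => (q.drop ab.1).take (ab.2 - ab.1)) := by
  rw [List.zip_map, List.map_map]
  refine List.map_congr_left fun ab _ => ?_
  cases ab with
  | mk a b => simp [List.drop_succ_cons, Nat.add_sub_add_right]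

lemma segs_shift_nogap (x : Int) (q : List Int) (b : Nat) (B : List Nat) :
    segsN (x :: q) (0 :: (b :: B).map (· + 1))
      = (x :: q.take b) :: ((b :: B).zip B).map
          (fun ab => (q.drop ab.1).take (ab.2 - ab.1)) := by
  unfold segsN
  simp only [List.map_cons, List.tail_cons, List.zip_cons_cons]
  refine congrArg₂ List.cons (by simp) ?_
  exact zipShift x q (b :: B) B

lemma segs_shift_gap (x : Int) (q : List Int) (b : Nat) (B : List Nat) :
    segsN (x :: q) (0 :: 1 :: (b :: B).map (· + 1))
      = [x] :: q.take b :: ((b :: B).zip B).map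
          (fun ab => (q.drop ab.1).take (ab.2 - ab.1)) := by
  unfold segsN
  simp only [List.map_cons, List.tail_cons, List.zip_cons_cons]
  refine congrArg₂ List.cons (by simp) (congrArg₂ List.cons (by simp) ?_)
  exact zipShift x q (b :: B) B

-- slicing at the boundaries built from brkN recovers exactly the runs
lemma segsN_spec (p : List Int) (hp : p ≠ []) :
    segsN p (0 :: (brkN p ++ [p.length])) = splitRuns p := by
  induction p with
  | nil => exact absurd rfl hp
  | cons x q ih =>
    rcases q with _ | ⟨y, t⟩
    · simp [segsN, brkN, splitRuns]
    · have hq : (y :: t) ≠ [] := List.cons_ne_nil y t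
      have ihq := ih hq
      obtain ⟨c, r, hsp⟩ := splitRuns_head y t
      rcases hL : brkN (y :: t) ++ [(y :: t).length] with _ | ⟨b, L'⟩
      · exact absurd hL (by simp)
      rw [hL] at ihq
      have hqsegs : segsN (y :: t) (0 :: b :: L')
          = ((y :: t).take b) :: ((b :: L').zip L').map
              (fun ab => ((y :: t).drop ab.1).take (ab.2 - ab.1)) := by
        unfold segsN
        simp only [List.tail_cons, List.zip_cons_cons, List.map_cons]
        exact congrArg₂ List.cons (by simp) rfl
      rw [hqsegs, hsp] at ihq
      obtain ⟨hhead, htail⟩ := List.cons_eq_cons.mp ihq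
      have hmap : (brkN (y :: t)).map (· + 1) ++ [(y :: t).length + 1]
          = (b :: L').map (· + 1) := by
        rw [← hL, List.map_append]
        simp
      by_cases hgap : 1 < y - x
      · have hbds : 0 :: (brkN (x :: y :: t) ++ [(x :: y :: t).length])
            = 0 :: 1 :: (b :: L').map (· + 1) := by
          rw [brkN_cons₂, if_pos hgap,
            show (x :: y :: t).length = (y :: t).length + 1 from rfl]
          simp only [List.cons_append, List.nil_append]
          rw [hmap]
        rw [hbds, segs_shift_gap, hhead, htail, splitRuns_cons, hsp]
        exact (if_neg (by omega : ¬ (y - x ≤ 1))).symm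
      · have hbds : 0 :: (brkN (x :: y :: t) ++ [(x :: y :: t).length])
            = 0 :: (b :: L').map (· + 1) := by
          rw [brkN_cons₂, if_neg hgap,
            show (x :: y :: t).length = (y :: t).length + 1 from rfl]
          simp only [List.nil_append]
          rw [hmap]
        rw [hbds, segs_shift_nogap, hhead, htail, splitRuns_cons, hsp]
        exact (if_pos (by omega : y - x ≤ 1)).symm

-- B's pre-filter cluster list (with brkN substituted for the breakpoint pass) is splitRuns
lemma segsInt (p : List Int) (hp : p ≠ []) :
    (((0 : Int) :: ((brkN p).map (fun k : Nat => (k : Int)) ++ [(p.length : Int)])).zip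
        (((0 : Int) :: ((brkN p).map (fun k : Nat => (k : Int)) ++ [(p.length : Int)])).tail)).map
      (fun ab => PySem.List.slice p (some ab.1) (some ab.2)) = splitRuns p := by
  rw [← segsN_spec p hp]
  simp only [List.tail_cons]
  have h2 : (brkN p).map (fun k : Nat => (k : Int)) ++ [(p.length : Int)]
      = (brkN p ++ [p.length]).map (fun k : Nat => (k : Int)) := by
    rw [List.map_append]
    simp
  have h1 : ((0 : Int) :: ((brkN p ++ [p.length]).map (fun k : Nat => (k : Int))))
      = (0 :: (brkN p ++ [p.length])).map (fun k : Nat => (k : Int)) := by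
    rw [List.map_cons]
    norm_num
  rw [h2, h1, List.zip_map, List.map_map]
  unfold segsN
  simp only [List.tail_cons]
  refine List.map_congr_left fun ab _ => ?_
  cases ab with
  | mk a b => simp [PySem.List.slice_natCast]

theorem get_hpp_clusters_eq (p : List Int) (m : Int) :
    get_hpp_clusters p m = get_hpp_clusters_alt p m := by
  by_cases hp : p = []
  · subst hp
    simp [get_hpp_clusters, get_hpp_clusters_alt, PySem.List.enumerate_nil]
  · simp only [get_hpp_clusters, get_hpp_clusters_alt, if_neg hp]
    rw [A_clusters, breaks_eq, segsInt p hp]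

-- ===== VERDICT (by name: the statement is the Claim_ definition above) =====
theorem get_hpp_clusters_spec : Claim_equal_get_hpp_clusters := by
  intro p m _
  unfold Spec_get_hpp_clusters
  exact get_hpp_clusters_eq p m
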